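-- pv_equiv track=rewrite | github.com/Emmonss/Basic-NLP-Models | Segment/DataProcess/data_utils.py | split_long_paras_into_sentence
-- ===== SOURCE A (Python) =====
-- def split_long_paras_into_sentence(word_list,seg_split_signal,seg_len):
--     new_word_list = []
--     pred,next = 0,0
--     cur_len = 0
--     for index,word in enumerate(word_list):
--         cur_len+=len(word)
--         if word in seg_split_signal:
--             next = index
--             if cur_len>seg_len:
--                 cur_len=0
--                 new_word_list.append(word_list[pred:next+1])
--                 pred = next+1
--     new_word_list.append(word_list[pred:len(word_list)])
--     return new_word_list
-- ===== SOURCE B (Python) =====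
-- def split_long_paras_into_sentence(word_list, seg_split_signal, seg_len):
--     # Prefix sums of word lengths: P[k] = total length of the first k words.
--     P = [0]
--     acc = 0
--     for w in word_list:
--         acc += len(w)
--         P.append(acc)
--     # Positions of split-signal words, in order.
--     cuts = [i for i, w in enumerate(word_list) if w in seg_split_signal]
--     out = []
--     pred = 0
--     for i in cuts:
--         if P[i + 1] - P[pred] > seg_len:
--             out.append(word_list[pred:i + 1])
--             pred = i + 1
--     out.append(word_list[pred:])
--     return out
-- ===== Notes on version B (the rewrite author's own statement) =====
-- stated objective: alternative
-- what changed: A's single interleaved scan that accumulates cur_len and cuts on the fly is replaced by precomputing a prefix-sum table of word lengths and the list of signal positions, then deciding cuts in a pass over the signal positions only, comparing prefix-sum differences against seg_len.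
import Mathlib
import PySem

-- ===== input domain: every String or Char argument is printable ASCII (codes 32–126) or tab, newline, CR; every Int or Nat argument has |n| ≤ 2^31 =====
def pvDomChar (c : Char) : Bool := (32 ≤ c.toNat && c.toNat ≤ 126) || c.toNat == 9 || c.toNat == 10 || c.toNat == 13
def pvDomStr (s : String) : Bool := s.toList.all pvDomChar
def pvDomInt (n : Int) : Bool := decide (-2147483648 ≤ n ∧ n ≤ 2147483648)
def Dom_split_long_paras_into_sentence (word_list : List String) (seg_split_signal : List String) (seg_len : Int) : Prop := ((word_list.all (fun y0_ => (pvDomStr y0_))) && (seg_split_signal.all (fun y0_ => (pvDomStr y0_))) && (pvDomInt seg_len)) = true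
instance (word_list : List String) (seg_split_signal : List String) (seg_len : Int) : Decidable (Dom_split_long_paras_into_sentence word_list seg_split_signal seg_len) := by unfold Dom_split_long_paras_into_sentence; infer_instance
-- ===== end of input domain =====

-- ===== PORT A =====
-- B replaces A's interleaved accumulate-and-cut scan by a prefix-sum table plus a pass over
-- signal positions only (objective: alternative decomposition, same asymptotic cost).

-- loop body of A's 'for index,word in enumerate(word_list)' (state: new_word_list, pred, next, cur_len)
def pvStepA (word_list seg_split_signal : List String) (seg_len : Int)
    (st : List (List String) × Int × Int × Int) (iw : Int × String) :
    List (List String) × Int × Int × Int :=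
  let cur := st.2.2.2 + PySem.Str.len iw.2
  if iw.2 ∈ seg_split_signal then
    let next := iw.1
    if cur > seg_len then
      (st.1 ++ [PySem.List.slice word_list (some st.2.1) (some (next + 1))], next + 1, next, 0)
    else (st.1, st.2.1, next, cur)
  else (st.1, st.2.1, st.2.2.1, cur)

def split_long_paras_into_sentence (word_list : List String) (seg_split_signal : List String) (seg_len : Int) : List (List String) :=
  let st := (PySem.List.enumerate word_list 0).foldl (pvStepA word_list seg_split_signal seg_len) ([], 0, 0, 0)
  st.1 ++ [PySem.List.slice word_list (some st.2.1) (some (word_list.length : Int))]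

-- ===== PORT B =====
-- body of B's prefix-sum loop: P.append(acc + len(w)) (state: P, acc)
def pvStepP (st : List Int × Int) (w : String) : List Int × Int :=
  (st.1 ++ [st.2 + PySem.Str.len w], st.2 + PySem.Str.len w)

-- body of B's loop over signal positions (state: out, pred).
-- P[i+1] and P[pred] are ported as pyGetD with default 0: B's own indices are always in range,
-- so the default is never consulted.
def pvStepB (word_list : List String) (seg_len : Int) (P : List Int)
    (st : List (List String) × Int) (i : Int) : List (List String) × Int :=
  if PySem.List.pyGetD P (i + 1) 0 - PySem.List.pyGetD P st.2 0 > seg_len then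
    (st.1 ++ [PySem.List.slice word_list (some st.2) (some (i + 1))], i + 1)
  else st

def split_long_paras_into_sentence_alt (word_list : List String) (seg_split_signal : List String) (seg_len : Int) : List (List String) :=
  let P := (word_list.foldl pvStepP ([(0 : Int)], 0)).1
  let cuts := ((PySem.List.enumerate word_list 0).filter (fun iw => decide (iw.2 ∈ seg_split_signal))).map (·.1)
  let st := cuts.foldl (pvStepB word_list seg_len P) ([], 0)
  st.1 ++ [PySem.List.slice word_list (some st.2) none]

-- ===== PRECONDITION & SPEC =====
def Spec_split_long_paras_into_sentence (word_list : List String) (seg_split_signal : List String) (seg_len : Int) (out : List (List String)) : Prop := out = split_long_paras_into_sentence_alt word_list seg_split_signal seg_len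
instance (word_list : List String) (seg_split_signal : List String) (seg_len : Int) (out : List (List String)) : Decidable (Spec_split_long_paras_into_sentence word_list seg_split_signal seg_len out) := by unfold Spec_split_long_paras_into_sentence; infer_instance

-- ===== CLAIM (what is proved, stated in full; the proofs are below) =====
def Claim_equal_split_long_paras_into_sentence : Prop := ∀ (word_list : List String) (seg_split_signal : List String) (seg_len : Int), Dom_split_long_paras_into_sentence word_list seg_split_signal seg_len → Spec_split_long_paras_into_sentence word_list seg_split_signal seg_len (split_long_paras_into_sentence word_list seg_split_signal seg_len)

-- ===== LEMMAS AND PROOFS =====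

-- total length of a list of words
def pvLenS (ws : List String) : Int := (ws.map PySem.Str.len).sum

def pvPrefix (a : Int) : List String → List Int
  | [] => []
  | w :: ws => (a + PySem.Str.len w) :: pvPrefix (a + PySem.Str.len w) ws

lemma pvFoldP (ws : List String) (init : List Int) (a : Int) :
    ws.foldl pvStepP (init, a) = (init ++ pvPrefix a ws, a + pvLenS ws) := by
  induction ws generalizing init a with
  | nil => simp [pvPrefix, pvLenS]
  | cons w ws ih =>
    rw [List.foldl_cons]
    show ws.foldl pvStepP (init ++ [a + PySem.Str.len w], a + PySem.Str.len w) = _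
    rw [ih]
    simp [pvPrefix, pvLenS, add_assoc]

lemma pvPrefix_getD (ws : List String) : ∀ (a : Int) (k : Nat), k < ws.length →
    (pvPrefix a ws).getD k 0 = a + pvLenS (ws.take (k + 1)) := by
  induction ws with
  | nil => intro a k h; simp at h
  | cons w ws ih =>
    intro a k h
    cases k with
    | zero => simp [pvPrefix, pvLenS]
    | succ j =>
      have hj : j < ws.length := by simpa using h
      show (pvPrefix (a + PySem.Str.len w) ws).getD j 0 = _
      rw [ih (a + PySem.Str.len w) j hj]
      simp only [List.take_succ_cons, pvLenS, List.map_cons, List.sum_cons]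
      ring

lemma pvP_getD (wl : List String) (k : Nat) (hk : k ≤ wl.length) :
    ((wl.foldl pvStepP ([(0 : Int)], 0)).1).getD k 0 = pvLenS (wl.take k) := by
  rw [pvFoldP]
  cases k with
  | zero => simp [pvLenS]
  | succ j =>
    have hj : j < wl.length := by omega
    show (pvPrefix 0 wl).getD j 0 = _
    rw [pvPrefix_getD wl 0 j hj]
    simp

lemma pvTakeSucc {α : Type} (l1 : List α) (w : α) (l2 : List α) (k : Nat) (h : l1.length = k) :
    (l1 ++ w :: l2).take (k + 1) = l1 ++ [w] := by
  induction l1 generalizing k with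
  | nil => simp at h; subst h; simp
  | cons x l1 ih =>
    cases k with
    | zero => simp at h
    | succ j => simp at h ⊢; exact ih j h

-- main invariant: from a common cut position pred (with cur_len = P k - P pred), A's scan over the
-- remaining words and B's pass over the remaining signal positions produce the same chunks and the
-- same final cut position.
lemma pvMain (wl sig : List String) (L : Int) (P : List Int)
    (hP : P = (wl.foldl pvStepP ([(0 : Int)], 0)).1) :
    ∀ (ws : List String) (k : Nat) (acc : List (List String)) (next : Int) (pred : Nat) (cur : Int),
    wl = wl.take k ++ ws → k ≤ wl.length → pred ≤ k →
    cur = pvLenS (wl.take k) - pvLenS (wl.take pred) →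
    ∃ p : Nat, p ≤ wl.length ∧
      ((PySem.List.enumerate ws k).foldl (pvStepA wl sig L) (acc, (pred : Int), next, cur)).1
        = ((((PySem.List.enumerate ws k).filter (fun iw => decide (iw.2 ∈ sig))).map (·.1)).foldl
            (pvStepB wl L P) (acc, (pred : Int))).1 ∧
      ((PySem.List.enumerate ws k).foldl (pvStepA wl sig L) (acc, (pred : Int), next, cur)).2.1 = (p : Int) ∧
      ((((PySem.List.enumerate ws k).filter (fun iw => decide (iw.2 ∈ sig))).map (·.1)).foldl
            (pvStepB wl L P) (acc, (pred : Int))).2 = (p : Int) := by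
  intro ws
  induction ws with
  | nil =>
    intro k acc next pred cur _ hk hpk _
    exact ⟨pred, by omega, by simp [PySem.List.enumerate_nil], by simp [PySem.List.enumerate_nil],
      by simp [PySem.List.enumerate_nil]⟩
  | cons w ws ih =>
    intro k acc next pred cur hwl hk hpk hcur
    have hklen : k + 1 + ws.length = wl.length := by
      conv_rhs => rw [hwl]
      simp [List.length_append, List.length_take, Nat.min_eq_left hk]
      omega
    have hk1 : k + 1 ≤ wl.length := by omega
    have hlen : (wl.take k).length = k := by simp [hk]
    have htk : wl.take (k + 1) = wl.take k ++ [w] := by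
      conv_lhs => rw [hwl]
      exact pvTakeSucc _ _ _ _ hlen
    have htail : wl = wl.take (k + 1) ++ ws := by
      rw [htk, List.append_assoc]; exact hwl
    have hsucc : pvLenS (wl.take (k + 1)) = pvLenS (wl.take k) + PySem.Str.len w := by
      rw [htk]; simp [pvLenS]
    have hcast : (k : Int) + 1 = ((k + 1 : Nat) : Int) := by push_cast; ring
    rw [PySem.List.enumerate_cons, hcast]
    by_cases hmem : w ∈ sig
    · -- signal word: both sides test the same condition
      have hcond : cur + PySem.Str.len w > L ↔
          PySem.List.pyGetD P (((k + 1 : Nat) : Int)) 0 - PySem.List.pyGetD P ((pred : Int)) 0 > L := by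
        rw [PySem.List.pyGetD_natCast, PySem.List.pyGetD_natCast, hP,
          pvP_getD wl (k + 1) hk1, pvP_getD wl pred (by omega), hcur, hsucc]
        constructor <;> intro h <;> linarith
      have hfilter : (((k : Int), w) :: PySem.List.enumerate ws ((k + 1 : Nat) : Int)).filter
            (fun iw => decide (iw.2 ∈ sig))
          = ((k : Int), w) :: (PySem.List.enumerate ws ((k + 1 : Nat) : Int)).filter
            (fun iw => decide (iw.2 ∈ sig)) := by
        simp [hmem]
      by_cases hcut : cur + PySem.Str.len w > L
      · -- cut here
        have hstepA : pvStepA wl sig L (acc, (pred : Int), next, cur) ((k : Int), w)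
            = (acc ++ [PySem.List.slice wl (some (pred : Int)) (some ((k : Int) + 1))],
               (k : Int) + 1, (k : Int), 0) := by
          simp only [pvStepA]
          rw [if_pos hmem, if_pos hcut]
        have hstepB : pvStepB wl L P (acc, (pred : Int)) ((k : Int))
            = (acc ++ [PySem.List.slice wl (some (pred : Int)) (some ((k : Int) + 1))],
               (k : Int) + 1) := by
          simp only [pvStepB]
          rw [hcast, if_pos (hcond.mp hcut)]
        rw [hfilter]
        simp only [List.foldl_cons, List.map_cons, hstepA, hstepB, hcast]
        exact ih (k + 1)
          (acc ++ [PySem.List.slice wl (some (pred : Int)) (some (((k + 1 : Nat) : Int)))])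
          (k : Int) (k + 1) 0 htail hk1 (le_refl _) (by ring)
      · -- signal but no cut
        have hstepA : pvStepA wl sig L (acc, (pred : Int), next, cur) ((k : Int), w)
            = (acc, (pred : Int), (k : Int), cur + PySem.Str.len w) := by
          simp only [pvStepA]
          rw [if_pos hmem, if_neg hcut]
        have hstepB : pvStepB wl L P (acc, (pred : Int)) ((k : Int)) = (acc, (pred : Int)) := by
          simp only [pvStepB]
          rw [hcast, if_neg (fun h => hcut (hcond.mpr h))]
        rw [hfilter]
        simp only [List.foldl_cons, List.map_cons, hstepA, hstepB]
        exact ih (k + 1) acc (k : Int) pred (cur + PySem.Str.len w) htail hk1 (by omega)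
          (by rw [hsucc, hcur]; ring)
    · -- not a signal word: A only accumulates, B skips the index entirely
      have hstepA : pvStepA wl sig L (acc, (pred : Int), next, cur) ((k : Int), w)
          = (acc, (pred : Int), next, cur + PySem.Str.len w) := by
        simp only [pvStepA]
        rw [if_neg hmem]
      have hfilter : (((k : Int), w) :: PySem.List.enumerate ws ((k + 1 : Nat) : Int)).filter
            (fun iw => decide (iw.2 ∈ sig))
          = (PySem.List.enumerate ws ((k + 1 : Nat) : Int)).filter
            (fun iw => decide (iw.2 ∈ sig)) := by
        simp [hmem]
      rw [hfilter]
      simp only [List.foldl_cons, hstepA]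
      exact ih (k + 1) acc next pred (cur + PySem.Str.len w) htail hk1 (by omega)
        (by rw [hsucc, hcur]; ring)

-- ===== VERDICT (by name: the statement is the Claim_ definition above) =====
theorem split_long_paras_into_sentence_spec : Claim_equal_split_long_paras_into_sentence := by
  intro wl sig L _
  show split_long_paras_into_sentence wl sig L = split_long_paras_into_sentence_alt wl sig L
  unfold split_long_paras_into_sentence split_long_paras_into_sentence_alt
  obtain ⟨p, hple, h1, h2, h3⟩ :=
    pvMain wl sig L ((wl.foldl pvStepP ([(0 : Int)], 0)).1) rfl wl 0 [] 0 0 0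
      (by simp) (by omega) (le_refl 0) (by simp)
  simp only [Nat.cast_zero] at h1 h2 h3
  simp only []
  rw [h1, h2, h3, PySem.List.slice_natCast, PySem.List.slice_from_natCast]
  congr 2
  exact List.take_of_length_le (by simp)
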